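-- pv_equiv track=rewrite | github.com/Omar-OTech/Data-structure-and-Algorithms | Balanced Number (Special Numbers Series #1 ).py | balanced_num
-- ===== SOURCE A (Python) =====
-- def balanced_num(number):
--     num_str = str(number)
--     l = len(num_str)
--     if l == 1:
--         return "Balanced"
--     # Find the middle index
--     if l % 2 == 0:
--         mid_right = l // 2
--         mid_left = mid_right - 1
--     else:
--         mid_left = l // 2
--         mid_right = mid_left
-- # Calculate the sum of the left part and right part
--     left_sum = sum(int(num_str[i]) for i in range(mid_left))
--     right_sum = sum(int(num_str[i]) for i in range(mid_right + 1, l))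
--
--     return "Balanced" if left_sum == right_sum else "Not Balanced"
-- ===== SOURCE B (Python) =====
-- def balanced_num(number):
--     num_str = str(number)
--     left_sum = right_sum = 0
--     i, j = 0, len(num_str) - 1
--     while i < j - 1:
--         left_sum += int(num_str[i])
--         right_sum += int(num_str[j])
--         i += 1
--         j -= 1
--     return "Balanced" if left_sum == right_sum else "Not Balanced"
-- ===== Notes on version B (the rewrite author's own statement) =====
-- stated objective: simpler
-- what changed: Replaces the middle-index computation plus two separate forward range-sums (and the length-1 special case) with a single two-pointer loop that walks inward from both ends, accumulating both sums at once.
import Mathlib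
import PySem

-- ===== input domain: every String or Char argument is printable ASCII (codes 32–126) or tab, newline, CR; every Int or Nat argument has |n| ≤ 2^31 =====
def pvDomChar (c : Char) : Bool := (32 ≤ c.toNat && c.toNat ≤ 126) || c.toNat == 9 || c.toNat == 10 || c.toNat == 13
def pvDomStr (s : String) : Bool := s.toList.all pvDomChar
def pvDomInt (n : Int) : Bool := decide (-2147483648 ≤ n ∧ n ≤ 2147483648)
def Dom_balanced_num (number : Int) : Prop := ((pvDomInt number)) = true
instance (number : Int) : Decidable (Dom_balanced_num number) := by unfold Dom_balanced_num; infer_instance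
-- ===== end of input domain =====

-- B replaces A's middle-index computation and two forward range-sums with one inward
-- two-pointer loop accumulating both sums at once (objective: simpler; same O(n) cost).


-- ===== PORT A =====
-- int(num_str[i]): exact for in-range indices holding digit characters, which Pre_
-- guarantees for every index either port actually reads.
def digAt (s : List Char) (i : Int) : Int := ((s.getD i.toNat '0').toNat : Int) - 48

def balanced_num (number : Int) : String :=
  let numStr := (PySem.Int.toStr number).toList
  let l : Nat := numStr.length
  if l = 1 then "Balanced"
  else
    let midLeft : Nat := if l % 2 = 0 then l / 2 - 1 else l / 2
    let midRight : Nat := if l % 2 = 0 then l / 2 else l / 2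
    let leftSum : Int :=
      (PySem.List.pyRange 0 (midLeft : Int) 1).foldl (fun acc i => acc + digAt numStr i) 0
    let rightSum : Int :=
      (PySem.List.pyRange ((midRight : Int) + 1) (l : Int) 1).foldl
        (fun acc i => acc + digAt numStr i) 0
    if leftSum = rightSum then "Balanced" else "Not Balanced"

-- ===== PORT B =====
-- while i < j - 1 over Python ints; with i, j : Nat the guard i < j - 1 is i + 1 < j
-- (both are false for j = 0), so the Nat loop is exact.
def bloop (s : List Char) (i j : Nat) (L R : Int) : Int × Int :=
  if i + 1 < j then bloop s (i + 1) (j - 1) (L + digAt s i) (R + digAt s j) else (L, R)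
termination_by j - i

def balanced_num_alt (number : Int) : String :=
  let s := (PySem.Int.toStr number).toList
  let p := bloop s 0 (s.length - 1) 0 0
  if p.1 = p.2 then "Balanced" else "Not Balanced"

-- ===== PRECONDITION & SPEC =====
-- Pre_ excludes negative numbers of two or more digits: there str(number) puts the sign
-- character among the summed positions and A raises ValueError at int('-'); B's loop
-- reaches the same character and raises the same ValueError, so nothing is claimed there.
def Pre_balanced_num (number : Int) : Prop := -9 ≤ number
instance (number : Int) : Decidable (Pre_balanced_num number) := by unfold Pre_balanced_num; infer_instance
def pvWitness_balanced_num : Int := 56239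

def Spec_balanced_num (number : Int) (out : String) : Prop := out = balanced_num_alt number
instance (number : Int) (out : String) : Decidable (Spec_balanced_num number out) := by unfold Spec_balanced_num; infer_instance

-- ===== CLAIM (what is proved, stated in full; the proofs are below) =====
def Claim_equal_balanced_num : Prop := ∀ (number : Int), Dom_balanced_num number → Pre_balanced_num number → Spec_balanced_num number (balanced_num number)

-- ===== LEMMAS AND PROOFS =====

-- sum of digAt over k consecutive indices starting at a
def dsum (s : List Char) (a : Nat) : Nat → Int
  | 0 => 0
  | k + 1 => digAt s a + dsum s (a + 1) k

theorem dsum_succ_right (s : List Char) : ∀ (k a : Nat),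
    dsum s a (k + 1) = dsum s a k + digAt s ((a : Int) + (k : Int)) := by
  intro k
  induction k with
  | zero => intro a; simp [dsum]
  | succ k ih =>
    intro a
    have h1 : dsum s a (k + 1 + 1) = digAt s a + dsum s (a + 1) (k + 1) := rfl
    have h2 : dsum s a (k + 1) = digAt s a + dsum s (a + 1) k := rfl
    rw [h1, h2, ih (a + 1)]
    have h3 : ((a + 1 : Nat) : Int) + (k : Int) = (a : Int) + ((k + 1 : Nat) : Int) := by
      push_cast; ring
    rw [h3]; ring

theorem bloop_eq (s : List Char) : ∀ (n i j : Nat) (L R : Int), j - i ≤ n →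
    bloop s i j L R = (L + dsum s i ((j - i) / 2), R + dsum s (j + 1 - (j - i) / 2) ((j - i) / 2)) := by
  intro n
  induction n with
  | zero =>
    intro i j L R h
    have hj : ¬ i + 1 < j := by omega
    have h2 : (j - i) / 2 = 0 := by omega
    rw [bloop, if_neg hj, h2]
    simp [dsum]
  | succ n ih =>
    intro i j L R h
    by_cases hj : i + 1 < j
    · rw [bloop, if_pos hj]
      rw [ih (i + 1) (j - 1) _ _ (by omega)]
      have hk : (j - 1 - (i + 1)) / 2 + 1 = (j - i) / 2 := by omega
      have hst : (j - 1) + 1 - (j - 1 - (i + 1)) / 2 = j + 1 - (j - i) / 2 := by omega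
      rw [hst, ← hk]
      rw [Prod.mk.injEq]
      constructor
      · simp only [dsum]
        ring
      · rw [dsum_succ_right]
        have hidx : ((j + 1 - ((j - 1 - (i + 1)) / 2 + 1) : Nat) : Int)
            + (((j - 1 - (i + 1)) / 2 : Nat) : Int) = ((j : Nat) : Int) := by omega
        rw [hidx]
        ring
    · rw [bloop, if_neg hj]
      have h2 : (j - i) / 2 = 0 := by omega
      rw [h2]
      simp [dsum]

theorem pyRange_fold (s : List Char) : ∀ (k a : Nat) (z : Int),
    (PySem.List.pyRange (a : Int) ((a : Int) + (k : Int)) 1).foldl (fun acc i => acc + digAt s i) z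
      = z + dsum s a k := by
  intro k
  induction k with
  | zero =>
    intro a z
    rw [PySem.List.pyRange_one_eq_nil (by simp)]
    simp [dsum]
  | succ k ih =>
    intro a z
    rw [PySem.List.pyRange_one_cons (by push_cast; omega)]
    show (PySem.List.pyRange ((a : Int) + 1) ((a : Int) + ((k : Int) + 1)) 1).foldl
        (fun acc i => acc + digAt s i) (z + digAt s a) = z + dsum s a (k + 1)
    have h1 : (a : Int) + 1 = ((a + 1 : Nat) : Int) := by push_cast; ring
    have h2 : (a : Int) + ((k : Int) + 1) = ((a + 1 : Nat) : Int) + ((k : Nat) : Int) := by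
      push_cast; ring
    rw [h1, h2, ih (a + 1) (z + digAt s a)]
    simp [dsum]
    ring

-- the whole comparison, parametric in the character list
theorem core_eq (s : List Char) :
    (let l : Nat := s.length
     if l = 1 then "Balanced"
     else
       let midLeft : Nat := if l % 2 = 0 then l / 2 - 1 else l / 2
       let midRight : Nat := if l % 2 = 0 then l / 2 else l / 2
       let leftSum : Int :=
         (PySem.List.pyRange 0 (midLeft : Int) 1).foldl (fun acc i => acc + digAt s i) 0
       let rightSum : Int :=
         (PySem.List.pyRange ((midRight : Int) + 1) (l : Int) 1).foldl
           (fun acc i => acc + digAt s i) 0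
       if leftSum = rightSum then "Balanced" else "Not Balanced")
    = (let p := bloop s 0 (s.length - 1) 0 0
       if p.1 = p.2 then "Balanced" else "Not Balanced") := by
  by_cases h0 : s.length = 0
  · have hs : s = [] := List.eq_nil_of_length_eq_zero h0
    subst hs
    simp [bloop, PySem.List.pyRange_one_eq_nil]
  set l := s.length with hl
  have hB : bloop s 0 (l - 1) 0 0
      = (dsum s 0 ((l - 1) / 2), dsum s (l - 1 + 1 - (l - 1) / 2) ((l - 1) / 2)) := by
    rw [bloop_eq s (l - 1) 0 (l - 1) 0 0 (by omega)]
    simp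
  by_cases h1 : l = 1
  · have hb0 : bloop s 0 0 0 0 = (0, 0) := by
      rw [bloop]; simp
    simp [h1, hb0]
  · rw [if_neg h1]
    have hleft : ∀ (m : Nat),
        (PySem.List.pyRange 0 (m : Int) 1).foldl (fun acc i => acc + digAt s i) 0
          = dsum s 0 m := by
      intro m
      have := pyRange_fold s m 0 0
      simpa using this
    have hright : ∀ (a c : Nat),
        (PySem.List.pyRange (a : Int) ((a + c : Nat) : Int) 1).foldl
          (fun acc i => acc + digAt s i) 0 = dsum s a c := by
      intro a c
      have := pyRange_fold s c a 0
      push_cast at this ⊢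
      simpa using this
    by_cases hp : l % 2 = 0
    · simp only [if_pos hp]
      have e1 : ((l / 2 : Nat) : Int) + 1 = (((l / 2 + 1) : Nat) : Int) := by push_cast; ring
      have e2 : ((l : Nat) : Int) = (((l / 2 + 1) + (l / 2 - 1) : Nat) : Int) := by
        have : l / 2 + 1 + (l / 2 - 1) = l := by omega
        rw [this]
      rw [hleft (l / 2 - 1), e1, e2, hright (l / 2 + 1) (l / 2 - 1), hB]
      have k2 : l - 1 + 1 - (l - 1) / 2 = l / 2 + 1 := by omega
      have k1 : (l - 1) / 2 = l / 2 - 1 := by omega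
      rw [k2, k1]
    · simp only [if_neg hp]
      have e1 : ((l / 2 : Nat) : Int) + 1 = (((l / 2 + 1) : Nat) : Int) := by push_cast; ring
      have e2 : ((l : Nat) : Int) = (((l / 2 + 1) + (l / 2) : Nat) : Int) := by
        have : l / 2 + 1 + l / 2 = l := by omega
        rw [this]
      rw [hleft (l / 2), e1, e2, hright (l / 2 + 1) (l / 2), hB]
      have k2 : l - 1 + 1 - (l - 1) / 2 = l / 2 + 1 := by omega
      have k1 : (l - 1) / 2 = l / 2 := by omega
      rw [k2, k1]

-- ===== VERDICT (by name: the statement is the Claim_ definition above) =====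
theorem balanced_num_spec : Claim_equal_balanced_num := by
  intro number _ _
  unfold Spec_balanced_num balanced_num balanced_num_alt
  exact core_eq ((PySem.Int.toStr number).toList)
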